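-- pv_equiv track=rewrite | github.com/kmgomezm/NLP_class_workshop | tokenization.py | bpe_simulate
-- ===== SOURCE A (Python) =====
-- def bpe_simulate(text, vocab_size=50):
--     """
--     Simulated BPE tokenization (educational approximation).
--     Real BPE requires a pre-trained vocab; this simulates the concept.
--     """
--     # Start with character-level tokens
--     words = text.lower().split()
--     tokens = []
--     for word in words:
--         chars = list(word)
--         # Simulate some common BPE merges (bigrams)
--         i = 0
--         merged = []
--         common_pairs = ["th", "he", "in", "er", "an", "re", "on", "en", "at", "es",
--                        "ti", "or", "ar", "al", "te", "co", "de", "ra", "se", "nd",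
--                        "ing", "ion", "tion", "ed", "ly", "ment", "ness", "ful"]
--         word_str = word
--         result = []
--         pos = 0
--         while pos < len(word_str):
--             matched = False
--             for pair in sorted(common_pairs, key=len, reverse=True):
--                 if word_str[pos:pos+len(pair)] == pair:
--                     result.append(f"[{pair}]")
--                     pos += len(pair)
--                     matched = True
--                     break
--             if not matched:
--                 result.append(word_str[pos])
--                 pos += 1
--         tokens.extend(result)
--         tokens.append("▁")  # word boundary marker
--     return [t for t in tokens if t != "▁" or tokens.index(t) != len(tokens)-1]
-- ===== SOURCE B (Python) =====
-- # Same simulated-BPE tokenization, but the per-position scan over the sorted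
-- # 28-pair list is replaced by a hand-compiled decision tree (a trie specialised
-- # by first character): dispatch on word[pos], then test only the few candidate
-- # subwords starting with that character, longest first.  The quirky index-based
-- # boundary filter collapses to a single "drop the trailing marker iff the first
-- # marker is the last token" check (all markers share one filter condition).
--
-- def _step(word, pos):
--     """Longest common-subword match at pos; returns (token, advance)."""
--     c = word[pos]
--     if c == 't':
--         if word.startswith('tion', pos): return ('[tion]', 4)
--         if word.startswith('th', pos): return ('[th]', 2)
--         if word.startswith('ti', pos): return ('[ti]', 2)
--         if word.startswith('te', pos): return ('[te]', 2)
--     elif c == 'm':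
--         if word.startswith('ment', pos): return ('[ment]', 4)
--     elif c == 'n':
--         if word.startswith('ness', pos): return ('[ness]', 4)
--         if word.startswith('nd', pos): return ('[nd]', 2)
--     elif c == 'i':
--         if word.startswith('ing', pos): return ('[ing]', 3)
--         if word.startswith('ion', pos): return ('[ion]', 3)
--         if word.startswith('in', pos): return ('[in]', 2)
--     elif c == 'f':
--         if word.startswith('ful', pos): return ('[ful]', 3)
--     elif c == 'h':
--         if word.startswith('he', pos): return ('[he]', 2)
--     elif c == 'e':
--         if word.startswith('er', pos): return ('[er]', 2)
--         if word.startswith('en', pos): return ('[en]', 2)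
--         if word.startswith('es', pos): return ('[es]', 2)
--         if word.startswith('ed', pos): return ('[ed]', 2)
--     elif c == 'a':
--         if word.startswith('an', pos): return ('[an]', 2)
--         if word.startswith('at', pos): return ('[at]', 2)
--         if word.startswith('ar', pos): return ('[ar]', 2)
--         if word.startswith('al', pos): return ('[al]', 2)
--     elif c == 'r':
--         if word.startswith('re', pos): return ('[re]', 2)
--         if word.startswith('ra', pos): return ('[ra]', 2)
--     elif c == 'o':
--         if word.startswith('on', pos): return ('[on]', 2)
--         if word.startswith('or', pos): return ('[or]', 2)
--     elif c == 'c':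
--         if word.startswith('co', pos): return ('[co]', 2)
--     elif c == 'd':
--         if word.startswith('de', pos): return ('[de]', 2)
--     elif c == 's':
--         if word.startswith('se', pos): return ('[se]', 2)
--     elif c == 'l':
--         if word.startswith('ly', pos): return ('[ly]', 2)
--     return (c, 1)
--
--
-- def bpe_simulate(text, vocab_size=50):
--     words = text.lower().split()
--     tokens = []
--     for word in words:
--         pos = 0
--         while pos < len(word):
--             tok, adv = _step(word, pos)
--             tokens.append(tok)
--             pos += adv
--         tokens.append("▁")
--     if tokens and tokens.index("▁") == len(tokens) - 1:
--         return tokens[:-1]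
--     return tokens
-- ===== Notes on version B (the rewrite author's own statement) =====
-- stated objective: faster
-- what changed: The per-position re-sort of the 28-pair list and scan with slice comparisons is replaced by a hand-compiled decision tree: dispatch on the current character, then test only the few candidate subwords with that head via startswith; the index-based boundary filter collapses to a single drop-the-trailing-marker-iff-the-first-marker-is-last check.
import Mathlib
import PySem

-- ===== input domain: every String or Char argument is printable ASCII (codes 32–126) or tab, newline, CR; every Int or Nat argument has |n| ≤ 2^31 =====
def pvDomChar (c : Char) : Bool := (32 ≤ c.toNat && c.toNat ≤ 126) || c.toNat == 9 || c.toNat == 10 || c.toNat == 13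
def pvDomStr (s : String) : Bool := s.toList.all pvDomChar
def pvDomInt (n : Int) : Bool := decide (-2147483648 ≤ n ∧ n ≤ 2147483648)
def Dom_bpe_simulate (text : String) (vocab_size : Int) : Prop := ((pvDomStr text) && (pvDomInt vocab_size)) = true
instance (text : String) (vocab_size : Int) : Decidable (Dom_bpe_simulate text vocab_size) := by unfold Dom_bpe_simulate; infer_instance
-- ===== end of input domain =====

-- B replaces A's per-position scan over the whole sorted 28-pair list by a
-- hand-compiled decision tree keyed on the current character (a trie specialised
-- by first letter), and collapses the index-based boundary filter to a single
-- "drop the trailing marker iff the first marker is the last token" check.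


-- ===== PORT A =====
-- common_pairs, a module-literal list
def pvPairsA : List String :=
  ["th","he","in","er","an","re","on","en","at","es",
   "ti","or","ar","al","te","co","de","ra","se","nd",
   "ing","ion","tion","ed","ly","ment","ness","ful"]

-- the inner `for pair in sorted(common_pairs, key=len, reverse=True): …` with break
def pvScanA (w : List Char) (pos : Nat) : List String → Option (String × Nat)
  | [] => none
  | p :: rest =>
      if PySem.List.slice w (some (pos : Int)) (some ((pos : Int) + PySem.Str.len p)) = p.toList
      then some (String.ofList ('[' :: p.toList ++ [']']), (PySem.Str.len p).toNat)
      else pvScanA w pos rest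

-- the `while pos < len(word_str)` loop; fuel = w.length makes it total (pos grows ≥ 1 each step)
def pvLoopA (w : List Char) : Nat → Nat → List String
  | 0, _ => []
  | fuel + 1, pos =>
      if h : pos < w.length then
        match pvScanA w pos (PySem.List.sorted pvPairsA (fun p => PySem.Str.len p) true) with
        | some (tok, adv) => tok :: pvLoopA w fuel (pos + adv)
        | none => String.ofList [w[pos]] :: pvLoopA w fuel (pos + 1)
      else []

def bpe_simulate (text : String) (vocab_size : Int) : List String :=
  let words := PySem.Str.split₀ (PySem.Str.lower text)
  let tokens := words.foldl (fun acc word => (acc ++ pvLoopA word.toList word.toList.length 0) ++ ["▁"]) []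
  tokens.filter (fun t => t != "▁" || PySem.List.index? tokens t != some (tokens.length - 1))

-- ===== PORT B =====
-- word.startswith(p, pos): exact for 0 ≤ pos and nonempty p (all 28 patterns are nonempty)
def pvStartsAt (w : List Char) (pos : Nat) (p : List Char) : Bool :=
  p.isPrefixOf (w.drop pos)

-- _step(word, pos): first-character dispatch, then the few candidates with that head, longest first
def pvStepB (w : List Char) (pos : Nat) (c : Char) : String × Nat :=
  if c = 't' then
    if pvStartsAt w pos ['t','i','o','n'] then ("[tion]", 4)
    else if pvStartsAt w pos ['t','h'] then ("[th]", 2)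
    else if pvStartsAt w pos ['t','i'] then ("[ti]", 2)
    else if pvStartsAt w pos ['t','e'] then ("[te]", 2)
    else (String.ofList [c], 1)
  else if c = 'm' then
    if pvStartsAt w pos ['m','e','n','t'] then ("[ment]", 4)
    else (String.ofList [c], 1)
  else if c = 'n' then
    if pvStartsAt w pos ['n','e','s','s'] then ("[ness]", 4)
    else if pvStartsAt w pos ['n','d'] then ("[nd]", 2)
    else (String.ofList [c], 1)
  else if c = 'i' then
    if pvStartsAt w pos ['i','n','g'] then ("[ing]", 3)
    else if pvStartsAt w pos ['i','o','n'] then ("[ion]", 3)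
    else if pvStartsAt w pos ['i','n'] then ("[in]", 2)
    else (String.ofList [c], 1)
  else if c = 'f' then
    if pvStartsAt w pos ['f','u','l'] then ("[ful]", 3)
    else (String.ofList [c], 1)
  else if c = 'h' then
    if pvStartsAt w pos ['h','e'] then ("[he]", 2)
    else (String.ofList [c], 1)
  else if c = 'e' then
    if pvStartsAt w pos ['e','r'] then ("[er]", 2)
    else if pvStartsAt w pos ['e','n'] then ("[en]", 2)
    else if pvStartsAt w pos ['e','s'] then ("[es]", 2)
    else if pvStartsAt w pos ['e','d'] then ("[ed]", 2)
    else (String.ofList [c], 1)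
  else if c = 'a' then
    if pvStartsAt w pos ['a','n'] then ("[an]", 2)
    else if pvStartsAt w pos ['a','t'] then ("[at]", 2)
    else if pvStartsAt w pos ['a','r'] then ("[ar]", 2)
    else if pvStartsAt w pos ['a','l'] then ("[al]", 2)
    else (String.ofList [c], 1)
  else if c = 'r' then
    if pvStartsAt w pos ['r','e'] then ("[re]", 2)
    else if pvStartsAt w pos ['r','a'] then ("[ra]", 2)
    else (String.ofList [c], 1)
  else if c = 'o' then
    if pvStartsAt w pos ['o','n'] then ("[on]", 2)
    else if pvStartsAt w pos ['o','r'] then ("[or]", 2)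
    else (String.ofList [c], 1)
  else if c = 'c' then
    if pvStartsAt w pos ['c','o'] then ("[co]", 2)
    else (String.ofList [c], 1)
  else if c = 'd' then
    if pvStartsAt w pos ['d','e'] then ("[de]", 2)
    else (String.ofList [c], 1)
  else if c = 's' then
    if pvStartsAt w pos ['s','e'] then ("[se]", 2)
    else (String.ofList [c], 1)
  else if c = 'l' then
    if pvStartsAt w pos ['l','y'] then ("[ly]", 2)
    else (String.ofList [c], 1)
  else (String.ofList [c], 1)

-- the `while pos < len(word)` loop of B
def pvLoopB (w : List Char) : Nat → Nat → List String
  | 0, _ => []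
  | fuel + 1, pos =>
      if h : pos < w.length then
        let p := pvStepB w pos w[pos]
        p.1 :: pvLoopB w fuel (pos + p.2)
      else []

def bpe_simulate_alt (text : String) (vocab_size : Int) : List String :=
  let words := PySem.Str.split₀ (PySem.Str.lower text)
  let tokens := words.foldl (fun acc word => (acc ++ pvLoopB word.toList word.toList.length 0) ++ ["▁"]) []
  if (!tokens.isEmpty && (PySem.List.index? tokens "▁" == some (tokens.length - 1)))
  then PySem.List.slice tokens none (some (-1))
  else tokens

-- ===== PRECONDITION & SPEC =====
def Spec_bpe_simulate (text : String) (vocab_size : Int) (out : List String) : Prop := out = bpe_simulate_alt text vocab_size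
instance (text : String) (vocab_size : Int) (out : List String) : Decidable (Spec_bpe_simulate text vocab_size out) := by unfold Spec_bpe_simulate; infer_instance

-- ===== CLAIM =====
def Claim_equal_bpe_simulate : Prop := ∀ (text : String) (vocab_size : Int), Dom_bpe_simulate text vocab_size → Spec_bpe_simulate text vocab_size (bpe_simulate text vocab_size)

-- ===== LEMMAS AND PROOFS =====
lemma pvSorted_eq : PySem.List.sorted pvPairsA (fun p => PySem.Str.len p) true =
    ["tion","ment","ness","ing","ion","ful","th","he","in","er","an","re","on","en","at","es",
     "ti","or","ar","al","te","co","de","ra","se","nd","ed","ly"] := by decide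

-- A's slice-equality test is a prefix test on the suffix starting at pos
lemma pvCond (w : List Char) (pos : Nat) (p : String) :
    (PySem.List.slice w (some (pos : Int)) (some ((pos : Int) + PySem.Str.len p)) = p.toList) ↔
    (p.toList.isPrefixOf (w.drop pos) = true) := by
  rw [PySem.Str.len_eq, PySem.List.slice_natCast_add, List.isPrefixOf_iff_prefix,
    List.prefix_iff_eq_take]
  exact ⟨fun h => h.symm, fun h => h.symm⟩


-- proof helper: A's scan as a function of the suffix starting at pos
def pvScanS (s : List Char) : List String → Option (String × Nat)
  | [] => none
  | p :: rest =>
      if p.toList.isPrefixOf s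
      then some (String.ofList ('[' :: p.toList ++ [']']), (PySem.Str.len p).toNat)
      else pvScanS s rest

lemma pvScanA_eq_scanS (w : List Char) (pos : Nat) (ps : List String) :
    pvScanA w pos ps = pvScanS (w.drop pos) ps := by
  induction ps with
  | nil => rfl
  | cons p rest ih =>
      simp only [pvScanA, pvScanS]
      rw [if_congr (pvCond w pos p) rfl ih]

set_option maxHeartbeats 2000000 in
-- the core step equivalence: A's scan (with its single-char fallback) is B's decision tree
lemma pvStep_eq (w : List Char) (pos : Nat) (h : pos < w.length) :
    (pvScanA w pos (PySem.List.sorted pvPairsA (fun p => PySem.Str.len p) true)).getD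
      (String.ofList [w[pos]], 1) = pvStepB w pos w[pos] := by
  have hd : List.drop pos w = w[pos] :: List.drop (pos + 1) w := List.drop_eq_getElem_cons h
  rw [pvSorted_eq, pvScanA_eq_scanS]
  simp only [pvStepB, pvStartsAt, hd, pvScanS]
  generalize w[pos] = c
  generalize List.drop (pos + 1) w = t
  simp only [apply_ite (fun o : Option (String × Nat) => o.getD (String.ofList [c], 1)),
    Option.getD_some, Option.getD_none]
  by_cases h1 : c = 't'
  · subst h1; simp [List.isPrefixOf]
  by_cases h2 : c = 'm'
  · subst h2; simp [List.isPrefixOf]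
  by_cases h3 : c = 'n'
  · subst h3; simp [List.isPrefixOf]
  by_cases h4 : c = 'i'
  · subst h4; simp [List.isPrefixOf]
  by_cases h5 : c = 'f'
  · subst h5; simp [List.isPrefixOf]
  by_cases h6 : c = 'h'
  · subst h6; simp [List.isPrefixOf]
  by_cases h7 : c = 'e'
  · subst h7; simp [List.isPrefixOf]
  by_cases h8 : c = 'a'
  · subst h8; simp [List.isPrefixOf]
  by_cases h9 : c = 'r'
  · subst h9; simp [List.isPrefixOf]
  by_cases h10 : c = 'o'
  · subst h10; simp [List.isPrefixOf]
  by_cases h11 : c = 'c'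
  · subst h11; simp [List.isPrefixOf]
  by_cases h12 : c = 'd'
  · subst h12; simp [List.isPrefixOf]
  by_cases h13 : c = 's'
  · subst h13; simp [List.isPrefixOf]
  by_cases h14 : c = 'l'
  · subst h14; simp [List.isPrefixOf]
  simp [List.isPrefixOf, Ne.symm h1, Ne.symm h2, Ne.symm h3, Ne.symm h4, Ne.symm h5,
    Ne.symm h6, Ne.symm h7, Ne.symm h8, Ne.symm h9, Ne.symm h10, Ne.symm h11,
    Ne.symm h12, Ne.symm h13, Ne.symm h14, h1, h2, h3, h4, h5, h6, h7, h8, h9, h10,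
    h11, h12, h13, h14]

lemma pvLoop_eq (w : List Char) (fuel pos : Nat) : pvLoopA w fuel pos = pvLoopB w fuel pos := by
  induction fuel generalizing pos with
  | zero => rfl
  | succ n ih =>
      simp only [pvLoopA, pvLoopB]
      by_cases h : pos < w.length
      · rw [dif_pos h, dif_pos h]
        have hs := pvStep_eq w pos h
        cases hscan : pvScanA w pos (PySem.List.sorted pvPairsA (fun p => PySem.Str.len p) true) with
        | some r =>
            rw [hscan] at hs
            simp only [Option.getD_some] at hs
            obtain ⟨tok, adv⟩ := r
            simp only [← hs, ih]
        | none =>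
            rw [hscan] at hs
            simp only [Option.getD_none] at hs
            simp only [← hs, ih]
      · rw [dif_neg h, dif_neg h]

-- A's index-based filter: all markers share one condition, so it either keeps
-- everything or (exactly when the first marker is the last token) drops that one marker
lemma pvFilter_eq (ts : List String) :
    ts.filter (fun t => t != "▁" || PySem.List.index? ts t != some (ts.length - 1)) =
    if (!ts.isEmpty && (PySem.List.index? ts "▁" == some (ts.length - 1)))
    then PySem.List.slice ts none (some (-1))
    else ts := by
  set P : String → Bool := fun t => t != "▁" || PySem.List.index? ts t != some (ts.length - 1) with hP
  by_cases hidx : PySem.List.index? ts "▁" = some (ts.length - 1)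
  · have hidx' : List.idxOf? "▁" ts = some (ts.length - 1) := by simpa using hidx
    obtain ⟨pre, suf, hts, hlen, hnm⟩ := (PySem.List.index?_eq_some_iff ts "▁" (ts.length - 1)).mp hidx
    have hne : ts ≠ [] := by rw [hts]; simp
    have hsuf : suf = [] := by
      have h1 : ts.length = pre.length + 1 + suf.length := by rw [hts]; simp; omega
      have h2 : 1 ≤ ts.length := by rw [hts]; simp; omega
      have h3 : suf.length = 0 := by omega
      exact List.eq_nil_of_length_eq_zero h3
    subst hsuf
    have hfil : ts.filter P = pre := by
      conv_lhs => rw [hts]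
      rw [List.filter_append]
      have hpre : pre.filter P = pre := List.filter_eq_self.mpr (fun a ha => by
        have hane : a ≠ "▁" := fun hh => hnm (hh ▸ ha)
        simp [hP, hane])
      have hone : List.filter P ["▁"] = [] := by simp [hP, hidx']
      rw [hpre, hone, List.append_nil]
    rw [hfil, if_pos (by simp [hne, hidx']), PySem.List.slice_to_neg_one, hts,
      List.dropLast_concat]
  · have hidx' : ¬ List.idxOf? "▁" ts = some (ts.length - 1) := by simpa using hidx
    rw [if_neg (by simp [hidx'])]
    apply List.filter_eq_self.mpr
    intro a _
    by_cases ha : a = "▁"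
    · subst ha; simp [hP, hidx']
    · simp [hP, ha]

-- ===== VERDICT =====
theorem bpe_simulate_spec : Claim_equal_bpe_simulate := by
  intro text vocab_size _
  unfold Spec_bpe_simulate bpe_simulate bpe_simulate_alt
  simp only [pvLoop_eq, pvFilter_eq]
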